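-- pv_equiv track=rewrite | github.com/Wulfic/Cicada3301 | Tools/p20_comprehensive_attack.py | columnar_transpose
-- ===== SOURCE A (Python) =====
-- def columnar_transpose(data, width):
--     """Read data by columns after arranging in rows of given width"""
--     if len(data) % width != 0:
--         return None
--     height = len(data) // width
--     result = []
--     for c in range(width):
--         for r in range(height):
--             result.append(data[r * width + c])
--     return result
-- ===== SOURCE B (Python) =====
-- def columnar_transpose(data, width):
--     """Read data by columns after arranging in rows of given width"""
--     if len(data) % width != 0:
--         return None
--     height = len(data) // width
--     rows = [data[i * width:(i + 1) * width] for i in range(height)]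
--     return [x for col in zip(*rows) for x in col]
-- ===== Notes on version B (the rewrite author's own statement) =====
-- stated objective: idiomatic
-- what changed: B materializes the row matrix by slicing and flattens its zip(*rows) transpose instead of computing flat indices r*width+c in nested loops.
import Mathlib
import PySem

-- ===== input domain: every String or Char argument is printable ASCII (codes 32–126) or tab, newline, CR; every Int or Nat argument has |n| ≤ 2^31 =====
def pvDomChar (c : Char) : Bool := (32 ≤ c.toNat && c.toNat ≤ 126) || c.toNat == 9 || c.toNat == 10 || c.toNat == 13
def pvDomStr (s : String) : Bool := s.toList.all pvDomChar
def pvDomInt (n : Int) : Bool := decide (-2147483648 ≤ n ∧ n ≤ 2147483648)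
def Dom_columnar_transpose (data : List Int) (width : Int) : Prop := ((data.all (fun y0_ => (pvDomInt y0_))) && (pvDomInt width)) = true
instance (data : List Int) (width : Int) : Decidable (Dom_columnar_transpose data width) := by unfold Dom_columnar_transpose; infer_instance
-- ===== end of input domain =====

-- B builds the row matrix by slicing and flattens its zip(*rows) transpose instead of
-- indexing r*width+c in nested loops (idiomatic restructuring, same cost).


-- ===== PORT A =====
def columnar_transpose (data : List Int) (width : Int) : Option (List Int) :=
  if PySem.Int.mod (data.length : Int) width ≠ 0 then none
  else
    let height := PySem.Int.floordiv (data.length : Int) width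
    (PySem.List.pyRange 0 width 1).foldl (fun acc c =>
      (PySem.List.pyRange 0 height 1).foldl (fun acc r =>
        acc.bind (fun res => (PySem.List.pyGet? data (r * width + c)).map (fun x => res ++ [x]))) acc)
      (some [])

-- ===== PORT B =====
-- zip(*rows) for Int rows: columns while every row still has an element (fuel = first row's length)
def pvZipStarGo : Nat → List (List Int) → List (List Int)
  | 0, _ => []
  | Nat.succ n, rows =>
    if rows.all (fun l => !l.isEmpty) then
      rows.map (fun l => l.headD 0) :: pvZipStarGo n (rows.map (fun l => l.tail))
    else []

def pvZipStar (rows : List (List Int)) : List (List Int) :=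
  match rows with
  | [] => []
  | r :: rs => pvZipStarGo r.length (r :: rs)

def columnar_transpose_alt (data : List Int) (width : Int) : Option (List Int) :=
  if PySem.Int.mod (data.length : Int) width ≠ 0 then none
  else
    let height := PySem.Int.floordiv (data.length : Int) width
    let rows := (PySem.List.pyRange 0 height 1).map (fun i =>
      PySem.List.slice data (some (i * width)) (some ((i + 1) * width)))
    some ((pvZipStar rows).flatten)

-- ===== PRECONDITION & SPEC =====
-- Pre_ excludes width = 0, on which both Pythons raise ZeroDivisionError in len(data) % width.
def Pre_columnar_transpose (data : List Int) (width : Int) : Prop := width ≠ 0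
instance (data : List Int) (width : Int) : Decidable (Pre_columnar_transpose data width) := by unfold Pre_columnar_transpose; infer_instance
def pvWitness_columnar_transpose : List Int × Int := ([1, 2, 3, 4, 5, 6], 2)

def Spec_columnar_transpose (data : List Int) (width : Int) (out : Option (List Int)) : Prop := out = columnar_transpose_alt data width
instance (data : List Int) (width : Int) (out : Option (List Int)) : Decidable (Spec_columnar_transpose data width out) := by unfold Spec_columnar_transpose; infer_instance

-- ===== CLAIM (what is proved, stated in full; the proofs are below) =====
def Claim_equal_columnar_transpose : Prop := ∀ (data : List Int) (width : Int), Dom_columnar_transpose data width → Pre_columnar_transpose data width → Spec_columnar_transpose data width (columnar_transpose data width)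

-- ===== LEMMAS AND PROOFS =====

-- an in-range lookup succeeds and yields the defaulted lookup's value
theorem pv_pyGet?_eq_some_pyGetD (xs : List Int) (i : Int) (h0 : 0 ≤ i) (h1 : i < (xs.length : Int)) :
    PySem.List.pyGet? xs i = some (PySem.List.pyGetD xs i 0) := by
  obtain ⟨k, rfl⟩ := Int.eq_ofNat_of_zero_le h0
  have hk : k < xs.length := by exact_mod_cast h1
  simp [List.getElem?_eq_getElem hk, List.getD_eq_getElem?_getD]

-- the inner append loop, when every index is in range, produces the map of lookups
theorem pv_foldl_inner (data : List Int) (l : List Int) (res : List Int)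
    (h : ∀ i ∈ l, 0 ≤ i ∧ i < (data.length : Int)) :
    l.foldl (fun acc i => acc.bind (fun r => (PySem.List.pyGet? data i).map (fun x => r ++ [x]))) (some res)
      = some (res ++ l.map (fun i => PySem.List.pyGetD data i 0)) := by
  induction l generalizing res with
  | nil => simp
  | cons i t ih =>
    have hi := h i (by simp)
    simp only [List.foldl_cons, Option.bind_some,
      pv_pyGet?_eq_some_pyGetD data i hi.1 hi.2, Option.map_some]
    rw [ih (res ++ [PySem.List.pyGetD data i 0]) (fun j hj => h j (by simp [hj]))]
    simp

-- the outer loop produces the flatMap of the inner maps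
theorem pv_foldl_outer (data : List Int) (width height : Int) (cols : List Int) (res : List Int)
    (h : ∀ c ∈ cols, ∀ r ∈ PySem.List.pyRange 0 height 1,
        0 ≤ r * width + c ∧ r * width + c < (data.length : Int)) :
    cols.foldl (fun acc c =>
        (PySem.List.pyRange 0 height 1).foldl (fun acc r =>
          acc.bind (fun rs => (PySem.List.pyGet? data (r * width + c)).map (fun x => rs ++ [x]))) acc)
      (some res)
      = some (res ++ cols.flatMap (fun c =>
          (PySem.List.pyRange 0 height 1).map (fun r => PySem.List.pyGetD data (r * width + c) 0))) := by
  induction cols generalizing res with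
  | nil => simp
  | cons c t ih =>
    simp only [List.foldl_cons]
    have hstep : (PySem.List.pyRange 0 height 1).foldl
        (fun acc r => acc.bind (fun rs => (PySem.List.pyGet? data (r * width + c)).map (fun x => rs ++ [x])))
        (some res)
      = ((PySem.List.pyRange 0 height 1).map (fun r => r * width + c)).foldl
        (fun acc i => acc.bind (fun rs => (PySem.List.pyGet? data i).map (fun x => rs ++ [x])))
        (some res) := by rw [List.foldl_map]
    rw [hstep, pv_foldl_inner data _ res (fun i hi => by
      obtain ⟨r, hr, rfl⟩ := List.mem_map.mp hi
      exact h c (by simp) r hr)]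
    rw [ih _ (fun c' hc' => h c' (by simp [hc']))]
    simp [List.flatMap_cons, List.map_map]

-- tail shifts a defaulted lookup by one
theorem pv_getD_tail (l : List Int) (c : Nat) : l.tail.getD c 0 = l.getD (c + 1) 0 := by
  cases l <;> simp [List.getD]

-- the defaulted head is the lookup at 0
theorem pv_headD_getD (l : List Int) : l.headD 0 = l.getD 0 0 := by
  cases l <;> simp [List.getD]

-- the zip engine on equal-length rows is the column map
theorem pv_zipStarGo_eq (m : Nat) : ∀ (rows : List (List Int)),
    (∀ row ∈ rows, row.length = m) →
    pvZipStarGo m rows = (List.range m).map (fun c => rows.map (fun row => row.getD c 0)) := by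
  induction m with
  | zero => intro rows _; simp [pvZipStarGo]
  | succ n ih =>
    intro rows hlen
    have hall : rows.all (fun l => !l.isEmpty) = true := by
      simp only [List.all_eq_true]
      intro l hl
      cases l with
      | nil => have := hlen [] hl; simp at this
      | cons a t => simp
    have htail : ∀ row ∈ rows.map (fun l => l.tail), row.length = n := by
      intro row hrow
      obtain ⟨l, hl, rfl⟩ := List.mem_map.mp hrow
      have := hlen l hl
      simp [List.length_tail, this]
    simp only [pvZipStarGo, hall, if_pos]
    rw [ih _ htail, List.range_succ_eq_map]
    simp only [List.map_cons, List.map_map]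
    congr 1
    · exact List.map_congr_left (fun l _ => pv_headD_getD l)
    · exact List.map_congr_left (fun c _ =>
        List.map_congr_left (fun l _ => pv_getD_tail l c))

-- pvZipStar on a nonempty matrix of equal-length rows
theorem pv_zipStar_eq (m : Nat) (rows : List (List Int))
    (hlen : ∀ row ∈ rows, row.length = m) (hne : rows ≠ []) :
    pvZipStar rows = (List.range m).map (fun c => rows.map (fun row => row.getD c 0)) := by
  cases rows with
  | nil => simp_all
  | cons r rs =>
    have hr : r.length = m := hlen r (by simp)
    simp only [pvZipStar, hr]
    exact pv_zipStarGo_eq m (r :: rs) hlen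

-- ===== VERDICT (by name: the statement is the Claim_ definition above) =====
theorem columnar_transpose_spec : Claim_equal_columnar_transpose := by
  intro data width _ hpre
  unfold Spec_columnar_transpose columnar_transpose columnar_transpose_alt
  by_cases hm : PySem.Int.mod (data.length : Int) width = 0
  · simp only [hm, ne_eq, not_true_eq_false, if_false]
    rcases lt_or_gt_of_ne hpre with hneg | hpos
    · -- width < 0: both loops are empty, both results are some []
      have hcols : PySem.List.pyRange 0 width 1 = [] :=
        PySem.List.pyRange_one_eq_nil (by omega)
      have hh : PySem.Int.floordiv (data.length : Int) width ≤ 0 := by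
        have hmul := PySem.Int.floordiv_mul_add_mod (data.length : Int) width
        rw [hm, add_zero] at hmul
        by_contra hgt
        push Not at hgt
        have h1 : PySem.Int.floordiv (data.length : Int) width * width ≤ 1 * width :=
          mul_le_mul_of_nonpos_right (by omega) (by omega)
        have h0 : (0 : Int) ≤ (data.length : Int) := Int.natCast_nonneg _
        omega
      have hrows : PySem.List.pyRange 0 (PySem.Int.floordiv (data.length : Int) width) 1 = [] :=
        PySem.List.pyRange_one_eq_nil (by omega)
      simp [hcols, hrows, pvZipStar]
    · -- width > 0
      set w : Nat := width.toNat with hw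
      have hwcast : width = (w : Int) := by omega
      have hmod : data.length % w = 0 := by
        rw [hwcast, PySem.Int.mod_natCast] at hm
        exact_mod_cast hm
      set n : Nat := data.length / w with hn
      have hlen : data.length = n * w := (Nat.div_mul_cancel (Nat.dvd_of_mod_eq_zero hmod)).symm
      have hheight : PySem.Int.floordiv (data.length : Int) width = (n : Int) := by
        rw [hwcast, PySem.Int.floordiv_natCast]
      rw [hheight]
      -- A side: the nested loops become a flatMap of in-range lookups
      have hbounds : ∀ c ∈ PySem.List.pyRange 0 width 1, ∀ r ∈ PySem.List.pyRange 0 (n : Int) 1,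
          0 ≤ r * width + c ∧ r * width + c < (data.length : Int) := by
        intro c hc r hr
        rw [PySem.List.mem_pyRange_one] at hc hr
        constructor
        · nlinarith [hc.1, hr.1, hpos]
        · have h1 : r * width + c < r * width + width := by omega
          have h2 : r * width + width = (r + 1) * width := by ring
          have h3 : (r + 1) * width ≤ (n : Int) * width :=
            mul_le_mul_of_nonneg_right (by omega) (by omega)
          have h4 : (n : Int) * width = (data.length : Int) := by
            rw [hwcast]; push_cast [hlen]; ring
          omega
      rw [pv_foldl_outer data width (n : Int) _ [] hbounds]
      -- B side: each row is a slice of length w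
      have hrow_eq : ∀ r : Nat, r < n →
          PySem.List.slice data (some ((r : Int) * width)) (some (((r : Int) + 1) * width))
            = (data.drop (r * w)).take w := by
        intro r hr
        have e1 : (r : Int) * width = ((r * w : Nat) : Int) := by rw [hwcast]; push_cast; ring
        have e2 : ((r : Int) + 1) * width = ((r * w : Nat) : Int) + (w : Int) := by
          rw [hwcast]; push_cast; ring
        rw [e1, e2, PySem.List.slice_natCast_add]
      have hrows_len : ∀ row ∈ (PySem.List.pyRange 0 (n : Int) 1).map (fun i =>
          PySem.List.slice data (some (i * width)) (some ((i + 1) * width))), row.length = w := by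
        intro row hrow
        obtain ⟨i, hi, rfl⟩ := List.mem_map.mp hrow
        rw [PySem.List.mem_pyRange_one] at hi
        obtain ⟨r, rfl⟩ := Int.eq_ofNat_of_zero_le hi.1
        have hrn : r < n := by exact_mod_cast hi.2
        rw [hrow_eq r hrn, List.length_take, List.length_drop, hlen]
        have : w ≤ n * w - r * w := by
          rw [← Nat.sub_mul]
          calc w = 1 * w := (one_mul w).symm
          _ ≤ (n - r) * w := Nat.mul_le_mul_right w (by omega)
        omega
      by_cases hn0 : n = 0
      · -- no rows: both sides are some []
        have h0 : PySem.List.pyRange 0 ((n : Int)) 1 = [] :=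
          PySem.List.pyRange_one_eq_nil (by simp [hn0])
        simp [h0, pvZipStar]
      · have hrne : (PySem.List.pyRange 0 (n : Int) 1).map (fun i =>
            PySem.List.slice data (some (i * width)) (some ((i + 1) * width))) ≠ [] := by
          simp only [ne_eq, List.map_eq_nil_iff]
          intro hcon
          have := congrArg List.length hcon
          rw [PySem.List.length_pyRange_one] at this
          simp at this
          omega
        rw [pv_zipStar_eq w _ hrows_len hrne]
        refine congrArg some ?_
        rw [List.nil_append]
        -- rewrite B's flatten-of-columns as a flatMap over range w
        rw [show ((List.range w).map (fun c =>
            ((PySem.List.pyRange 0 (n : Int) 1).map (fun i =>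
              PySem.List.slice data (some (i * width)) (some ((i + 1) * width)))).map
            (fun row => row.getD c 0))).flatten
          = (List.range w).flatMap (fun c =>
            ((PySem.List.pyRange 0 (n : Int) 1).map (fun i =>
              PySem.List.slice data (some (i * width)) (some ((i + 1) * width)))).map
            (fun row => row.getD c 0)) from by simp [List.flatMap_def]]
        -- rewrite A's column range as range w
        rw [PySem.List.pyRange_one 0 width,
          show (width - 0).toNat = w from by omega, List.flatMap_map]
        -- compare the two column maps pointwise
        simp only [List.flatMap_def]
        refine congrArg List.flatten (List.map_congr_left ?_)
        intro c hc
        rw [List.mem_range] at hc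
        rw [List.map_map]
        apply List.map_congr_left
        intro r hr
        rw [PySem.List.mem_pyRange_one] at hr
        obtain ⟨rn, rfl⟩ := Int.eq_ofNat_of_zero_le hr.1
        have hrn : rn < n := by exact_mod_cast hr.2
        simp only [Function.comp]
        rw [hrow_eq rn hrn]
        have e : (rn : Int) * width + (0 + (c : Int)) = ((rn * w + c : Nat) : Int) := by
          rw [hwcast]; push_cast; ring
        rw [e, PySem.List.pyGetD_natCast]
        simp [List.getD_eq_getElem?_getD, hc, List.getElem?_drop]
  · simp [hm]
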